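-- pv_equiv track=rewrite | github.com/tech4germany/steuerlotse | erica_app/erica/pyeric/pyeric_controller.py | standardise_state_id_list
-- ===== SOURCE A (Python) =====
-- def standardise_state_id_list(states_id_list):
--     states = {}
--
--     for state in states_id_list:
--         standardised_state_name = state['name'].split(" ")[0]
--         state_ids = states.get(standardised_state_name, [])
--         state_ids.append(state['id'])
--         states[standardised_state_name] = state_ids
--
--     return states
-- ===== SOURCE B (Python) =====
-- def standardise_state_id_list(states_id_list):
--     pairs = [(state['name'].split(" ")[0], state['id']) for state in states_id_list]
--     keys = list(dict.fromkeys(k for k, _ in pairs))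
--     return {k: [i for kk, i in pairs if kk == k] for k in keys}
-- ===== Notes on version B (the rewrite author's own statement) =====
-- stated objective: idiomatic
-- what changed: Replaces A's single-pass mutable dict accumulation (get/append/re-insert) by precomputing the (key, id) pairs once, deduplicating the keys in first-occurrence order with dict.fromkeys, and building each group with a per-key filter comprehension.
import Mathlib
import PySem

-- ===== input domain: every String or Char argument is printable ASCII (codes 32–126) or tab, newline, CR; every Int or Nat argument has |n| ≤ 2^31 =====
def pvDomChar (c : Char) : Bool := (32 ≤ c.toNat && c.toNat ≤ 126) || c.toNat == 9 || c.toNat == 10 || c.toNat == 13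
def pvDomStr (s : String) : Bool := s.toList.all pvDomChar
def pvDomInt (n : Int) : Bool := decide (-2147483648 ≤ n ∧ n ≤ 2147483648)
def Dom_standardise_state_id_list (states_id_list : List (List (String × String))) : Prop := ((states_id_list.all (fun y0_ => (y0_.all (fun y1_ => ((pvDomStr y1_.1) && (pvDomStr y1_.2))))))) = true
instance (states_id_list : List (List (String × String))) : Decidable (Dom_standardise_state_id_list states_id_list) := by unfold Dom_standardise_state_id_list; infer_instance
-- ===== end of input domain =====

-- B replaces A's single-pass dict accumulation by: precompute (key, id) pairs, dedup the keys
-- in first-occurrence order, then build each group by a per-key filter (idiomatic alternative, not faster).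


-- ===== PORT A =====
-- state['name'].split(" ")[0] — exact under Pre_ (the "name" key is present; split(" ") is never empty,
-- so the [0] default of pyGetD is never used)
def pvKey (state : List (String × String)) : String :=
  PySem.List.pyGetD ((PySem.Str.split? ((PySem.Dict.mk state).getD "name" "") " ").getD []) 0 ""

-- state['id'] — exact under Pre_ (the "id" key is present)
def pvId (state : List (String × String)) : String :=
  (PySem.Dict.mk state).getD "id" ""

def standardise_state_id_list (states_id_list : List (List (String × String))) : List (String × List String) :=
  (states_id_list.foldl
    (fun (states : PySem.Dict String (List String)) state =>
      let standardised_state_name := pvKey state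
      let state_ids := states.getD standardised_state_name []
      states.insert standardised_state_name (state_ids ++ [pvId state]))
    PySem.Dict.empty).items

-- ===== PORT B =====
def standardise_state_id_list_alt (states_id_list : List (List (String × String))) : List (String × List String) :=
  let pairs := states_id_list.map (fun state => (pvKey state, pvId state))
  let keys := PySem.List.dedup (pairs.map (·.1))
  keys.map (fun k => (k, (pairs.filter (fun p => p.1 == k)).map (·.2)))

-- ===== PRECONDITION & SPEC =====
-- Pre_ excludes exactly the inputs where Python A raises KeyError: a state dict missing "name" or "id".
def Pre_standardise_state_id_list (states_id_list : List (List (String × String))) : Prop :=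
  (states_id_list.all (fun state =>
    (PySem.Dict.mk state).contains "name" && (PySem.Dict.mk state).contains "id")) = true
instance (states_id_list : List (List (String × String))) : Decidable (Pre_standardise_state_id_list states_id_list) := by unfold Pre_standardise_state_id_list; infer_instance

def pvWitness_standardise_state_id_list : (List (List (String × String))) :=
  [[("name", "Nordrhein Westfalen"), ("id", "5")], [("name", "Nordrhein X"), ("id", "6")], [("name", "Bayern"), ("id", "9")]]

def Spec_standardise_state_id_list (states_id_list : List (List (String × String))) (out : List (String × List String)) : Prop := out = standardise_state_id_list_alt states_id_list
instance (states_id_list : List (List (String × String))) (out : List (String × List String)) : Decidable (Spec_standardise_state_id_list states_id_list out) := by unfold Spec_standardise_state_id_list; infer_instance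

-- ===== CLAIM (what is proved, stated in full; the proofs are below) =====
def Claim_equal_standardise_state_id_list : Prop := ∀ (states_id_list : List (List (String × String))), Dom_standardise_state_id_list states_id_list → Pre_standardise_state_id_list states_id_list → Spec_standardise_state_id_list states_id_list (standardise_state_id_list states_id_list)

-- ===== LEMMAS AND PROOFS =====

-- A's "get, append, re-insert" step is Dict.modify with default [] and (· ++ [v]).
theorem pv_insert_eq_modify (d : PySem.Dict String (List String)) (k : String) (v : String) :
    d.insert k (d.getD k [] ++ [v]) = d.modify k [] (· ++ [v]) := rfl

theorem standardise_eq :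
    ∀ (l : List (List (String × String))),
      standardise_state_id_list l = standardise_state_id_list_alt l := by
  intro l
  unfold standardise_state_id_list standardise_state_id_list_alt
  simp only [pv_insert_eq_modify]
  have hfold :
      l.foldl (fun (d : PySem.Dict String (List String)) state =>
          d.modify (pvKey state) [] (· ++ [pvId state])) PySem.Dict.empty
        = (l.map (fun state => (pvKey state, pvId state))).foldl
            (fun (d : PySem.Dict String (List String)) p => d.modify p.1 [] (· ++ [p.2]))
            PySem.Dict.empty := by
    rw [List.foldl_map]
  rw [hfold]
  set pairs := l.map (fun state => (pvKey state, pvId state)) with hpairs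
  set d := pairs.foldl
      (fun (d : PySem.Dict String (List String)) p => d.modify p.1 [] (· ++ [p.2]))
      PySem.Dict.empty with hd
  have hnd : d.keys.Nodup := by
    rw [hd]
    exact PySem.Dict.nodup_keys_foldl_modify_key pairs (·.1) [] (fun _ p => (· ++ [p.2]))
      PySem.Dict.empty (by simp)
  have hkeys : d.keys = PySem.List.dedup (pairs.map (·.1)) := by
    rw [hd]
    have := PySem.Dict.keys_foldl_modify_key (d := (PySem.Dict.empty : PySem.Dict String (List String)))
      (l := pairs) (key := (·.1)) (d0 := []) (f := fun _ p => (· ++ [p.2]))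
    simp [this, PySem.Set.update, PySem.Set.ofList_eq_foldl]
  rw [PySem.Dict.items_eq_map_keys d hnd [], hkeys]
  apply List.map_congr_left
  intro k _
  have := PySem.Dict.getD_foldl_modify_append (l := pairs)
    (d := (PySem.Dict.empty : PySem.Dict String (List String))) (c := k)
  rw [hd, this]
  simp

-- ===== VERDICT (by name: the statement is the Claim_ definition above) =====
theorem standardise_state_id_list_spec : Claim_equal_standardise_state_id_list := by
  intro l _ _
  exact standardise_eq l
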